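-- pv_equiv track=rewrite | github.com/Urvashi-91/Urvashi_Git_Repo | Interview/Stripe/minByColumn.py | minByColumnSorted2
-- ===== SOURCE A (Python) =====
-- def minByColumnSorted2(mat, cols):
--     choices = list(range(len(mat)))
--     for col in cols:
--         vals = [(i, mat[i].get(col, 0)) for i in choices]
--         _, minVal = min(vals, key = lambda x : x[1])
--         choices = [i for i,val in vals if val==minVal]
--         # if we find a unique minimum
--         if len(choices) == 1:
--             return mat[choices[0]]
--     # we never found a unique minimum, so we can choose any one of them
--     return mat[choices[0]]
-- ===== SOURCE B (Python) =====
-- def minByColumnSorted2(mat, cols):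
--     best = mat[0]
--     for row in mat[1:]:
--         for c in cols:
--             b, r = best.get(c, 0), row.get(c, 0)
--             if r < b:
--                 best = row
--                 break
--             if r > b:
--                 break
--     return best
-- ===== Notes on version B (the rewrite author's own statement) =====
-- stated objective: alternative
-- what changed: A narrows a candidate row-index set column-by-column (computing each column's min over the surviving candidates and filtering, with an early return on a unique minimum); B makes a single row-outer pass keeping the lexicographically smallest row so far, comparing each row to the current best column-by-column with an early exit at the first differing column.
import Mathlib
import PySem

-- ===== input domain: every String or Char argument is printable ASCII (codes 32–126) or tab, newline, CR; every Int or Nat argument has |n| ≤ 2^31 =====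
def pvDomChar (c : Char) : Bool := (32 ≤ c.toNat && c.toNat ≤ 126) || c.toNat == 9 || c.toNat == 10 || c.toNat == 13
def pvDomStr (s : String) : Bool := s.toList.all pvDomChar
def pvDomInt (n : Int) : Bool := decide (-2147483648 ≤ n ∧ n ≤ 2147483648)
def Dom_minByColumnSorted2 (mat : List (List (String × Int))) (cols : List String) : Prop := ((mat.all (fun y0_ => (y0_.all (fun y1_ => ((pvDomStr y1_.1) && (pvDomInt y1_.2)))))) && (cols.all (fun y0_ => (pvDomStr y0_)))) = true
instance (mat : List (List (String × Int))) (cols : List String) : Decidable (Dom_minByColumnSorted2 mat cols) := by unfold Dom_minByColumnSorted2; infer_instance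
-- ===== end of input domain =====

-- B replaces A's column-outer candidate-set narrowing by a single row-outer pass keeping the
-- first row with the lexicographically smallest key list (objective: alternative, same cost).

-- ===== PORT A =====
-- mat[i].get(col, 0) for an index i produced by range(len(mat))
def pvVal (mat : List (List (String × Int))) (col : String) (i : Int) : Int :=
  PySem.Dict.getD (PySem.Dict.mk (PySem.List.pyGetD mat i [])) col 0

-- the 'for col in cols' loop of A, carrying the candidate index list 'choices'
def pvALoop (mat : List (List (String × Int))) : List String → List Int → List (String × Int)
  | [], choices => PySem.List.pyGetD mat (PySem.List.pyGetD choices 0 0) []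
  | col :: cols, choices =>
      let vals := choices.map (fun i => (i, pvVal mat col i))
      match PySem.List.min? vals (fun x => x.2) with
      | none => []   -- Python: min([]) raises ValueError; unreachable under Pre_
      | some mv =>
        let choices' := (vals.filter (fun x => x.2 == mv.2)).map (fun x => x.1)
        if choices'.length == 1 then PySem.List.pyGetD mat (PySem.List.pyGetD choices' 0 0) []
        else pvALoop mat cols choices'

def minByColumnSorted2 (mat : List (List (String × Int))) (cols : List String) : List (String × Int) :=
  pvALoop mat cols (PySem.List.pyRange 0 (mat.length : Int) 1)

-- ===== PORT B =====
-- the inner 'for c in cols' loop: early-exit lexicographic comparison of row against best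
def pvCmpLoop (best row : List (String × Int)) : List String → List (String × Int)
  | [] => best
  | c :: cs =>
    let b := PySem.Dict.getD (PySem.Dict.mk best) c 0
    let r := PySem.Dict.getD (PySem.Dict.mk row) c 0
    if r < b then row
    else if r > b then best
    else pvCmpLoop best row cs

def minByColumnSorted2_alt (mat : List (List (String × Int))) (cols : List String) : List (String × Int) :=
  match mat with
  | [] => []   -- Python: mat[0] raises IndexError; unreachable under Pre_
  | r0 :: rest => rest.foldl (fun best row => pvCmpLoop best row cols) r0

-- ===== PRECONDITION & SPEC =====
-- A (and B) raise on an empty matrix (ValueError/IndexError); that is all Pre_ excludes.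
def Pre_minByColumnSorted2 (mat : List (List (String × Int))) (cols : List String) : Prop :=
  mat ≠ []
instance (mat : List (List (String × Int))) (cols : List String) : Decidable (Pre_minByColumnSorted2 mat cols) := by unfold Pre_minByColumnSorted2; infer_instance

def pvWitness_minByColumnSorted2 : (List (List (String × Int))) × List String :=
  ([[("a", 2), ("b", 1)], [("a", 1), ("b", 3)]], ["a", "b"])

def Spec_minByColumnSorted2 (mat : List (List (String × Int))) (cols : List String) (out : List (String × Int)) : Prop := out = minByColumnSorted2_alt mat cols
instance (mat : List (List (String × Int))) (cols : List String) (out : List (String × Int)) : Decidable (Spec_minByColumnSorted2 mat cols out) := by unfold Spec_minByColumnSorted2; infer_instance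

-- ===== CLAIM (what is proved, stated in full; the proofs are below) =====
def Claim_equal_minByColumnSorted2 : Prop := ∀ (mat : List (List (String × Int))) (cols : List String), Dom_minByColumnSorted2 mat cols → Pre_minByColumnSorted2 mat cols → Spec_minByColumnSorted2 mat cols (minByColumnSorted2 mat cols)

-- ===== LEMMAS AND PROOFS =====

-- proof-only notions: the key list of a row and lexicographic comparison of key lists
def pvKey (row : List (String × Int)) (cols : List String) : List Int :=
  cols.map (fun c => PySem.Dict.getD (PySem.Dict.mk row) c 0)

-- Python's list/tuple '<' (lexicographic) on integer lists
def pvLexLt : List Int → List Int → Bool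
  | [], [] => false
  | [], _ :: _ => true
  | _ :: _, [] => false
  | a :: as, b :: bs => if a < b then true else if b < a then false else pvLexLt as bs

-- pvLexLt is a strict total order -------------------------------------------------

theorem pvLexLt_irrefl : ∀ a : List Int, pvLexLt a a = false := by
  intro a; induction a with
  | nil => rfl
  | cons x xs ih => simp [pvLexLt, ih]

theorem pvLexLt_connex : ∀ a b : List Int, pvLexLt a b = false → pvLexLt b a = false → a = b := by
  intro a
  induction a with
  | nil => intro b hab _; cases b with
    | nil => rfl
    | cons y ys => simp [pvLexLt] at hab
  | cons x xs ih =>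
    intro b hab hba
    cases b with
    | nil => simp [pvLexLt] at hba
    | cons y ys =>
      simp only [pvLexLt] at hab hba
      by_cases h1 : x < y
      · simp [h1] at hab
      · by_cases h2 : y < x
        · simp [h1, h2] at hba
        · have hxy : x = y := by omega
          simp [h1, h2] at hab hba
          rw [hxy, ih ys hab hba]

theorem pvLexLt_trans : ∀ a b c : List Int, pvLexLt a b = true → pvLexLt b c = true → pvLexLt a c = true := by
  intro a
  induction a with
  | nil => intro b c hab hbc; cases b with
    | nil => simp [pvLexLt] at hab
    | cons y ys => cases c with
      | nil => simp [pvLexLt] at hbc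
      | cons z zs => simp [pvLexLt]
  | cons x xs ih =>
    intro b c hab hbc
    cases b with
    | nil => simp [pvLexLt] at hab
    | cons y ys =>
      cases c with
      | nil => simp [pvLexLt] at hbc
      | cons z zs =>
        simp only [pvLexLt] at hab hbc ⊢
        by_cases h1 : x < y
        · by_cases h2 : y < z
          · simp [show x < z from lt_trans h1 h2]
          · by_cases h3 : z < y
            · simp [h2, h3] at hbc
            · have : y = z := by omega
              simp [this ▸ h1]
        · by_cases h1' : y < x
          · simp [h1, h1'] at hab
          · have hxy : x = y := by omega
            simp [h1, h1'] at hab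
            by_cases h2 : y < z
            · simp [hxy ▸ h2]
            · by_cases h3 : z < y
              · simp [h2, h3] at hbc
              · have hyz : y = z := by omega
                simp [h2, h3] at hbc
                have hxz : ¬ x < z := by omega
                have hzx : ¬ z < x := by omega
                simp [hxz, hzx, ih ys zs hab hbc]

theorem pvLexLt_asymm {a b : List Int} (h : pvLexLt a b = true) : pvLexLt b a = false := by
  by_contra hba
  have hba' : pvLexLt b a = true := by revert hba; cases pvLexLt b a <;> simp
  have := pvLexLt_trans a b a h hba'
  rw [pvLexLt_irrefl] at this; exact absurd this (by simp)

theorem pvLexLt_cons_same (a : Int) (as bs : List Int) :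
    pvLexLt (a :: as) (a :: bs) = pvLexLt as bs := by
  simp [pvLexLt]

theorem not_head_lt_of_pvLexLt_false {x y : Int} {xs ys : List Int}
    (h : pvLexLt (x :: xs) (y :: ys) = false) : ¬ x < y := by
  intro hxy; simp [pvLexLt, hxy] at h

-- FirstMin: r is the first element of l whose key is lexicographically minimal ----

def FM (k : Int → List Int) (l : List Int) (r : Int) : Prop :=
  ∃ l1 l2, l = l1 ++ r :: l2 ∧ (∀ x ∈ l1, pvLexLt (k r) (k x) = true) ∧
    (∀ x ∈ l, pvLexLt (k x) (k r) = false)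

def pvFoldMin (k : Int → List Int) (c : Int) (cs : List Int) : Int :=
  cs.foldl (fun b i => if pvLexLt (k i) (k b) then i else b) c

-- the B-side fold computes a FirstMin element
theorem pvFoldMin_FM (k : Int → List Int) :
    ∀ (cs : List Int) (c : Int), FM k (c :: cs) (pvFoldMin k c cs) := by
  intro cs
  induction cs with
  | nil =>
    intro c
    exact ⟨[], [], rfl, by simp, by simp [pvFoldMin, pvLexLt_irrefl]⟩
  | cons i cs' ih =>
    intro c
    have hstep : pvFoldMin k c (i :: cs') =
        pvFoldMin k (if pvLexLt (k i) (k c) then i else c) cs' := by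
      simp [pvFoldMin, List.foldl_cons]
    by_cases h : pvLexLt (k i) (k c) = true
    · rw [hstep, if_pos h]
      obtain ⟨l1, l2, hdec, hpre, hmin⟩ := ih i
      set r := pvFoldMin k i cs' with hr
      have hri : pvLexLt (k i) (k r) = false := hmin i (by simp)
      have hrc : pvLexLt (k r) (k c) = true := by
        cases hv : pvLexLt (k r) (k c) with
        | true => rfl
        | false =>
          exfalso
          cases hv2 : pvLexLt (k c) (k r) with
          | true => exact absurd (pvLexLt_trans _ _ _ h hv2) (by simp [hri])
          | false =>
            have := pvLexLt_connex _ _ hv hv2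
            rw [← this] at h; exact absurd h (by simp [hri])
      refine ⟨c :: l1, l2, by rw [hdec]; rfl, ?_, ?_⟩
      · intro x hx
        rcases List.mem_cons.mp hx with rfl | hx'
        · exact hrc
        · exact hpre x hx'
      · intro x hx
        rcases List.mem_cons.mp hx with rfl | hx'
        · exact pvLexLt_asymm hrc
        · exact hmin x (by rw [hdec] at hx' ⊢; exact hx')
    · have h' : pvLexLt (k i) (k c) = false := by revert h; cases pvLexLt (k i) (k c) <;> simp
      rw [hstep, if_neg (by simp [h'])]
      obtain ⟨l1, l2, hdec, hpre, hmin⟩ := ih c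
      set r := pvFoldMin k c cs' with hr
      cases l1 with
      | nil =>
        have hrc : c = r := ((List.cons.injEq _ _ _ _).mp hdec).1
        have hl2 : cs' = l2 := ((List.cons.injEq _ _ _ _).mp hdec).2
        refine ⟨[], i :: cs', by rw [← hrc]; rfl, by simp, ?_⟩
        intro x hx
        rcases List.mem_cons.mp hx with rfl | hx'
        · rw [← hrc]; exact pvLexLt_irrefl _
        · rcases List.mem_cons.mp hx' with rfl | hx''
          · rw [← hrc]; exact h'
          · exact hmin x (by simp [hx''])
      | cons a l1' =>
        have ha : a = c := (((List.cons.injEq _ _ _ _).mp hdec).1).symm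
        have htail : cs' = l1' ++ r :: l2 := ((List.cons.injEq _ _ _ _).mp hdec).2
        have hrc : pvLexLt (k r) (k c) = true := ha ▸ hpre a (by simp)
        have hrik : pvLexLt (k r) (k i) = true := by
          cases hv : pvLexLt (k r) (k i) with
          | true => rfl
          | false =>
            exfalso
            cases hv2 : pvLexLt (k i) (k r) with
            | true => exact absurd (pvLexLt_trans _ _ _ hv2 hrc) (by simp [h'])
            | false =>
              have := pvLexLt_connex _ _ hv2 hv
              rw [this] at h'; exact absurd hrc (by simp [h'])
        refine ⟨c :: i :: l1', l2, by rw [htail]; rfl, ?_, ?_⟩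
        · intro x hx
          rcases List.mem_cons.mp hx with rfl | hx'
          · exact hrc
          · rcases List.mem_cons.mp hx' with rfl | hx''
            · exact hrik
            · exact hpre x (List.mem_cons_of_mem a hx'')
        · intro x hx
          rcases List.mem_cons.mp hx with rfl | hx'
          · exact hmin x (by simp)
          · rcases List.mem_cons.mp hx' with rfl | hx''
            · exact pvLexLt_asymm hrik
            · exact hmin x (by simp [hx''])

-- filtering to the minimizers of the head column preserves the FirstMin element --
theorem FM_filter_step (v : Int → Int) (k : Int → List Int) (m : Int)
    {l : List Int} {r : Int}
    (hFM : FM (fun i => v i :: k i) l r)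
    (hlow : ∀ x ∈ l, m ≤ v x) (hach : ∃ x ∈ l, v x = m) :
    FM k (l.filter (fun i => v i == m)) r := by
  obtain ⟨l1, l2, hdec, hpre, hmin⟩ := hFM
  have hvr : v r = m := by
    obtain ⟨x0, hx0, hx0m⟩ := hach
    have h1 : pvLexLt (v x0 :: k x0) (v r :: k r) = false := hmin x0 hx0
    have h2 : ¬ v x0 < v r := not_head_lt_of_pvLexLt_false h1
    have h3 := hlow r (by rw [hdec]; simp)
    omega
  refine ⟨l1.filter (fun i => v i == m), l2.filter (fun i => v i == m), ?_, ?_, ?_⟩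
  · rw [hdec]; simp [List.filter_append, List.filter_cons, hvr]
  · intro x hx
    have hxl1 : x ∈ l1 := List.mem_of_mem_filter hx
    have hxm : v x = m := by
      have := (List.mem_filter.mp hx).2; simpa using this
    have h2 : pvLexLt (v r :: k r) (v x :: k x) = true := hpre x hxl1
    rwa [hvr, ← hxm, pvLexLt_cons_same] at h2
  · intro x hx
    have hxl : x ∈ l := List.mem_of_mem_filter hx
    have hxm : v x = m := by
      have := (List.mem_filter.mp hx).2; simpa using this
    have h2 : pvLexLt (v x :: k x) (v r :: k r) = false := hmin x hxl
    rwa [hvr, ← hxm, pvLexLt_cons_same] at h2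

-- the A-side loop returns mat[r] for the FirstMin index r -------------------------
theorem pvALoop_eq (mat : List (List (String × Int))) :
    ∀ (cols : List String) (choices : List Int) (r : Int),
      FM (fun i => pvKey (PySem.List.pyGetD mat i []) cols) choices r →
      pvALoop mat cols choices = PySem.List.pyGetD mat r [] := by
  intro cols
  induction cols with
  | nil =>
    intro choices r hFM
    obtain ⟨l1, l2, hdec, hpre, _⟩ := hFM
    have hl1 : l1 = [] := by
      cases l1 with
      | nil => rfl
      | cons a l1' =>
        exfalso
        have := hpre a (by simp)
        simp [pvKey, pvLexLt] at this
    subst hl1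
    simp only [List.nil_append] at hdec
    rw [pvALoop, hdec, PySem.List.pyGetD_zero_cons]
  | cons col cols ih =>
    intro choices r hFM
    have hkey : (fun i => pvKey (PySem.List.pyGetD mat i []) (col :: cols)) =
        (fun i => pvVal mat col i :: pvKey (PySem.List.pyGetD mat i []) cols) := by
      funext i; simp [pvKey, pvVal]
    have hne : choices ≠ [] := by
      obtain ⟨l1, l2, hdec, _, _⟩ := hFM
      rw [hdec]; simp
    have hvalsne : choices.map (fun i => (i, pvVal mat col i)) ≠ [] := by
      simpa using hne
    obtain ⟨mv, hmv⟩ : ∃ mv, PySem.List.min? (choices.map (fun i => (i, pvVal mat col i))) (fun x => x.2) = some mv := by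
      cases hq : PySem.List.min? (choices.map (fun i => (i, pvVal mat col i))) (fun x => x.2) with
      | none => exact absurd ((PySem.List.min?_eq_none_iff _ _).mp hq) hvalsne
      | some mv => exact ⟨mv, rfl⟩
    have hmin := PySem.List.min?_isMin hmv
    have hmem := PySem.List.min?_mem hmv
    -- the filtered candidate list is a plain filter of choices
    have hch : ((choices.map (fun i => (i, pvVal mat col i))).filter (fun x => x.2 == mv.2)).map (fun x => x.1)
        = choices.filter (fun i => pvVal mat col i == mv.2) := by
      rw [List.filter_map, List.map_map]
      simp [Function.comp_def]
    have hlow : ∀ x ∈ choices, mv.2 ≤ pvVal mat col x := by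
      intro x hx
      exact hmin (x, pvVal mat col x) (List.mem_map.mpr ⟨x, hx, rfl⟩)
    have hach : ∃ x ∈ choices, pvVal mat col x = mv.2 := by
      obtain ⟨i, hi, hfi⟩ := List.mem_map.mp hmem
      exact ⟨i, hi, by simp [← hfi]⟩
    have hFM' : FM (fun i => pvKey (PySem.List.pyGetD mat i []) cols)
        (choices.filter (fun i => pvVal mat col i == mv.2)) r := by
      apply FM_filter_step (v := fun i => pvVal mat col i) (m := mv.2)
      · rw [← hkey]; exact hFM
      · exact hlow
      · exact hach
    rw [pvALoop]
    simp only [hmv, hch]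
    by_cases hlen : (choices.filter (fun i => pvVal mat col i == mv.2)).length == 1
    · rw [if_pos hlen]
      obtain ⟨l1, l2, hdec, _, _⟩ := hFM'
      have hlen' : (choices.filter (fun i => pvVal mat col i == mv.2)).length = 1 := by
        simpa using hlen
      rw [hdec] at hlen' ⊢
      have hl1 : l1 = [] := by cases l1 <;> simp_all
      subst hl1
      have hl2 : l2 = [] := by cases l2 <;> simp_all
      subst hl2
      simp [PySem.List.pyGetD_zero_cons]
    · rw [if_neg (by simpa using hlen)]
      exact ih _ r hFM'

-- the early-exit comparison loop decides pvLexLt on the key lists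
theorem pvCmpLoop_eq : ∀ (cols : List String) (best row : List (String × Int)),
    pvCmpLoop best row cols = if pvLexLt (pvKey row cols) (pvKey best cols) then row else best := by
  intro cols
  induction cols with
  | nil => intro best row; simp [pvCmpLoop, pvKey, pvLexLt]
  | cons c cs ih =>
    intro best row
    simp only [pvCmpLoop, pvKey, List.map_cons, pvLexLt]
    by_cases h1 : PySem.Dict.getD (PySem.Dict.mk row) c 0 < PySem.Dict.getD (PySem.Dict.mk best) c 0
    · simp [h1]
    · by_cases h2 : PySem.Dict.getD (PySem.Dict.mk best) c 0 < PySem.Dict.getD (PySem.Dict.mk row) c 0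
      · simp [h1, h2, not_lt_of_gt h2]
      · simp [h1, h2, ih best row, pvKey]

-- B's fold over rows equals the index fold pvFoldMin
theorem pvBFold_eq (mat : List (List (String × Int))) (cols : List String) :
    ∀ (l : List Int) (b : Int),
      (l.foldl (fun best i => pvCmpLoop best (PySem.List.pyGetD mat i []) cols)
        (PySem.List.pyGetD mat b []))
      = PySem.List.pyGetD mat (pvFoldMin (fun i => pvKey (PySem.List.pyGetD mat i []) cols) b l) [] := by
  intro l
  induction l with
  | nil => intro b; simp [pvFoldMin]
  | cons i l' ih =>
    intro b
    rw [List.foldl_cons, pvCmpLoop_eq]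
    have hstep : pvFoldMin (fun j => pvKey (PySem.List.pyGetD mat j []) cols) b (i :: l') =
        pvFoldMin (fun j => pvKey (PySem.List.pyGetD mat j []) cols)
          (if pvLexLt (pvKey (PySem.List.pyGetD mat i []) cols) (pvKey (PySem.List.pyGetD mat b []) cols) then i else b) l' := by
      simp [pvFoldMin, List.foldl_cons]
    rw [hstep]
    by_cases h : pvLexLt (pvKey (PySem.List.pyGetD mat i []) cols) (pvKey (PySem.List.pyGetD mat b []) cols)
    · simp only [h, if_true]
      exact ih i
    · simp only [h, if_false]
      exact ih b

-- ===== VERDICT (by name: the statement is the Claim_ definition above) =====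
theorem minByColumnSorted2_spec : Claim_equal_minByColumnSorted2 := by
  intro mat cols _ hpre
  unfold Spec_minByColumnSorted2
  obtain ⟨r0, rest, hmat⟩ : ∃ r0 rest, mat = r0 :: rest := by
    cases mat with
    | nil => exact absurd rfl hpre
    | cons a b => exact ⟨a, b, rfl⟩
  have hn : (0 : Int) < (mat.length : Int) := by simp [hmat]
  have hrange : PySem.List.pyRange 0 (mat.length : Int) 1 =
      0 :: PySem.List.pyRange 1 (mat.length : Int) 1 := by
    simpa using PySem.List.pyRange_one_cons (a := 0) (b := (mat.length : Int)) hn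
  have hFMr := pvFoldMin_FM (fun i => pvKey (PySem.List.pyGetD mat i []) cols)
      (PySem.List.pyRange 1 (mat.length : Int) 1) 0
  have hA : minByColumnSorted2 mat cols =
      PySem.List.pyGetD mat (pvFoldMin (fun i => pvKey (PySem.List.pyGetD mat i []) cols) 0
        (PySem.List.pyRange 1 (mat.length : Int) 1)) [] := by
    unfold minByColumnSorted2
    rw [hrange]
    exact pvALoop_eq mat cols _ _ hFMr
  have hr0 : PySem.List.pyGetD mat 0 ([] : List (String × Int)) = r0 := by
    rw [hmat]; exact PySem.List.pyGetD_zero_cons ..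
  have hrest : (PySem.List.pyRange 1 (mat.length : Int) 1).map
      (fun j => PySem.List.pyGetD mat j ([] : List (String × Int))) = rest := by
    have h := PySem.List.map_pyGetD_pyRange' (xs := mat) (a := (1 : Int))
      (d := ([] : List (String × Int))) (by norm_num)
    rw [h, hmat]
    rfl
  have hB : minByColumnSorted2_alt mat cols =
      PySem.List.pyGetD mat (pvFoldMin (fun i => pvKey (PySem.List.pyGetD mat i []) cols) 0
        (PySem.List.pyRange 1 (mat.length : Int) 1)) [] := by
    have h1 : minByColumnSorted2_alt mat cols =
        rest.foldl (fun best row => pvCmpLoop best row cols) r0 := by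
      rw [hmat]
      rfl
    rw [h1, ← hrest, List.foldl_map, ← hr0]
    exact pvBFold_eq mat cols (PySem.List.pyRange 1 (mat.length : Int) 1) 0
  rw [hA, hB]
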